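-- pv_equiv track=rewrite | github.com/z3ncrypt-create/HashCrackerX | hashcrackx.py | vigenere_try
-- ===== SOURCE A (Python) =====
-- COMMON_WORDS = ["the","and","that","this","flag","ctf","is","are","you","hello","password"]
--
-- COMMON_KEYS = ["secret","password","key","ctf","flag","admin","hello"]
--
-- def vigenere_try(s):
--     results = []
--     if not any(ch.isalpha() for ch in s): return results
--     for k in COMMON_KEYS:
--         out = []
--         ki = 0
--         for ch in s:
--             if ch.isalpha():
--                 base = 65 if ch.isupper() else 97
--                 shift = ord(k[ki % len(k)].lower()) - 97
--                 out.append(chr((ord(ch) - base - shift) % 26 + base))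
--                 ki += 1
--             else:
--                 out.append(ch)
--         txt = ''.join(out)
--         if any(w in txt.lower() for w in COMMON_WORDS):
--             results.append((k, txt))
--     return results
-- ===== SOURCE B (Python) =====
-- from itertools import cycle
--
-- COMMON_WORDS = ["the","and","that","this","flag","ctf","is","are","you","hello","password"]
--
-- COMMON_KEYS = ["secret","password","key","ctf","flag","admin","hello"]
--
-- def _dec_letter(ch, kc):
--     base = 65 if ch.isupper() else 97
--     return chr((ord(ch) - base - (ord(kc.lower()) - 97)) % 26 + base)
--
-- def _decrypt(s, k):
--     letters = [ch for ch in s if ch.isalpha()]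
--     dec = [_dec_letter(ch, kc) for ch, kc in zip(letters, cycle(k))]
--     it = iter(dec)
--     return ''.join(next(it) if ch.isalpha() else ch for ch in s)
--
-- def vigenere_try(s):
--     if not any(ch.isalpha() for ch in s):
--         return []
--     candidates = [(k, _decrypt(s, k)) for k in COMMON_KEYS]
--     return [(k, txt) for k, txt in candidates
--             if any(w in txt.lower() for w in COMMON_WORDS)]
-- ===== Notes on version B (the rewrite author's own statement) =====
-- stated objective: idiomatic
-- what changed: B replaces A's single stateful loop (manual ki key-index counter interleaved with output building) by an extract-map-reassemble pipeline: filter out the letters, decrypt them by zipping against cycle(key), then weave them back into the original string, and builds the result list by comprehension+filter instead of conditional appends.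
import Mathlib
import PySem

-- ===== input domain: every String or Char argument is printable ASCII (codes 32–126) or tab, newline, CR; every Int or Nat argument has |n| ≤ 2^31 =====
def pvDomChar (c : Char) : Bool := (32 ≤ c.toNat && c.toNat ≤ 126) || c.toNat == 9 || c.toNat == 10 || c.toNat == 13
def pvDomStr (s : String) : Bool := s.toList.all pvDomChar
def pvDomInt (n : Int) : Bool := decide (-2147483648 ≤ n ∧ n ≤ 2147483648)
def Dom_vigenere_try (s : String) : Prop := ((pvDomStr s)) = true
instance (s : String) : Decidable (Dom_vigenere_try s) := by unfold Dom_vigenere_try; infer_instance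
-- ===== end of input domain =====

-- B rewrites A's single stateful loop (manual key-index counter) as an idiomatic
-- extract-map-reassemble pipeline; same cost, no speed claim.

-- module-level constants shared by A and B (as in the Python module)
def COMMON_WORDS : List (List Char) :=
  ["the".toList, "and".toList, "that".toList, "this".toList, "flag".toList, "ctf".toList,
   "is".toList, "are".toList, "you".toList, "hello".toList, "password".toList]

def COMMON_KEYS : List (List Char) :=
  ["secret".toList, "password".toList, "key".toList, "ctf".toList, "flag".toList,
   "admin".toList, "hello".toList]

-- ===== PORT A =====
-- the body of A's inner 'for ch in s' loop, state = (out, ki)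
def vigStepA (k : List Char) (st : List Char × Nat) (ch : Char) : List Char × Nat :=
  if PySem.Chars.isalpha ch then
    let base : Int := if PySem.Chars.isupper ch then 65 else 97
    let kc : Char := (k[st.2 % k.length]?).getD ' '   -- k[ki % len(k)]; keys are nonempty, getD unreachable
    let shift : Int := ((PySem.Chars.lowerChar kc).toNat : Int) - 97
    (st.1 ++ [Char.ofNat (PySem.Int.mod (((ch.toNat : Int)) - base - shift) 26 + base).toNat], st.2 + 1)
  else
    (st.1 ++ [ch], st.2)

def vigenere_try (s : String) : List (String × String) :=
  if ¬ (s.toList.any PySem.Chars.isalpha) then []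
  else
    COMMON_KEYS.foldl (fun results k =>
      let out : List Char := (s.toList.foldl (vigStepA k) ([], 0)).1
      if COMMON_WORDS.any (fun w => PySem.Chars.isIn w (PySem.Chars.lower out)) then
        results ++ [(String.ofList k, String.ofList out)]
      else results) []

-- ===== PORT B =====
-- _dec_letter(ch, kc)
def decLetterB (ch kc : Char) : Char :=
  let base : Int := if PySem.Chars.isupper ch then 65 else 97
  Char.ofNat (PySem.Int.mod (((ch.toNat : Int)) - base - (((PySem.Chars.lowerChar kc).toNat : Int) - 97)) 26 + base).toNat

-- the first n characters of cycle(k)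
def keystreamB (k : List Char) (n : Nat) : List Char :=
  (List.range n).map (fun i => (k[i % k.length]?).getD ' ')

-- ''.join(next(it) if ch.isalpha() else ch for ch in s): weave decrypted letters back in
def weaveB : List Char → List Char → List Char
  | [], _ => []
  | ch :: cs, ds =>
      if PySem.Chars.isalpha ch then ds.headD ch :: weaveB cs ds.tail
      else ch :: weaveB cs ds

-- _decrypt(s, k)
def decryptB (s k : List Char) : List Char :=
  let letters := s.filter PySem.Chars.isalpha
  let dec := List.zipWith decLetterB letters (keystreamB k letters.length)
  weaveB s dec

def vigenere_try_alt (s : String) : List (String × String) :=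
  if s.toList.any PySem.Chars.isalpha then
    ((COMMON_KEYS.map (fun k => (k, decryptB s.toList k))).filter
        (fun p => COMMON_WORDS.any (fun w => PySem.Chars.isIn w (PySem.Chars.lower p.2)))).map
      (fun p => (String.ofList p.1, String.ofList p.2))
  else []

-- ===== PRECONDITION & SPEC =====
def Spec_vigenere_try (s : String) (out : List (String × String)) : Prop := out = vigenere_try_alt s
instance (s : String) (out : List (String × String)) : Decidable (Spec_vigenere_try s out) := by unfold Spec_vigenere_try; infer_instance

-- ===== CLAIM (what is proved, stated in full; the proofs are below) =====
def Claim_equal_vigenere_try : Prop := ∀ (s : String), Dom_vigenere_try s → Spec_vigenere_try s (vigenere_try s)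

-- ===== LEMMAS AND PROOFS =====

-- keystream starting at key index ki (proof-only generalisation of keystreamB)
def keystreamFrom (k : List Char) (ki n : Nat) : List Char :=
  (List.range n).map (fun i => (k[(ki + i) % k.length]?).getD ' ')

theorem keystreamFrom_zero (k : List Char) (n : Nat) :
    keystreamFrom k 0 n = keystreamB k n := by
  simp [keystreamFrom, keystreamB]

theorem keystreamFrom_succ (k : List Char) (ki n : Nat) :
    keystreamFrom k ki (n + 1)
      = (k[ki % k.length]?).getD ' ' :: keystreamFrom k (ki + 1) n := by
  simp only [keystreamFrom, List.range_succ_eq_map, List.map_cons, List.map_map]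
  refine congrArg₂ List.cons (by simp) (List.map_congr_left fun i _ => ?_)
  have h : ki + (i + 1) = (ki + 1) + i := by omega
  simp [Function.comp, h]

theorem loopA_eq (k cs : List Char) (acc : List Char) (ki : Nat) :
    (cs.foldl (vigStepA k) (acc, ki)).1
      = acc ++ weaveB cs
          (List.zipWith decLetterB (cs.filter PySem.Chars.isalpha)
            (keystreamFrom k ki (cs.filter PySem.Chars.isalpha).length)) := by
  induction cs generalizing acc ki with
  | nil => simp [weaveB]
  | cons ch cs ih =>
    by_cases h : PySem.Chars.isalpha ch = true
    · have hs : vigStepA k (acc, ki) ch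
          = (acc ++ [decLetterB ch ((k[ki % k.length]?).getD ' ')], ki + 1) := by
        simp [vigStepA, h, decLetterB]
      simp only [List.foldl_cons, hs, ih, List.filter_cons_of_pos h,
        List.length_cons, keystreamFrom_succ, List.zipWith_cons_cons, weaveB, h,
        if_pos, List.headD_cons, List.tail_cons]
      simp
    · have hs : vigStepA k (acc, ki) ch = (acc ++ [ch], ki) := by
        simp [vigStepA, h]
      simp only [List.foldl_cons, hs, ih, List.filter_cons_of_neg h, weaveB, h]
      simp

theorem decrypt_eq (s k : List Char) :
    (s.foldl (vigStepA k) ([], 0)).1 = decryptB s k := by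
  simpa [keystreamFrom_zero, decryptB] using loopA_eq k s [] 0

-- generic: A's conditional-append foldl over keys = B's map-filter-map
theorem fold_eq (cond : List Char → Bool) (F : List Char → List Char) :
    ∀ (keys : List (List Char)) (init : List (String × String)),
      keys.foldl (fun results k =>
          if cond (F k) then results ++ [(String.ofList k, String.ofList (F k))] else results) init
        = init ++ ((keys.map (fun k => (k, F k))).filter (fun p => cond p.2)).map
            (fun p => (String.ofList p.1, String.ofList p.2)) := by
  intro keys
  induction keys with
  | nil => intro init; simp
  | cons k ks ih =>
    intro init
    by_cases h : cond (F k) = true <;> simp [h, ih]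

-- ===== VERDICT (by name: the statement is the Claim_ definition above) =====
theorem vigenere_try_spec : Claim_equal_vigenere_try := by
  intro s _
  show vigenere_try s = vigenere_try_alt s
  by_cases h : s.toList.any PySem.Chars.isalpha
  · have key := fold_eq
      (fun out => COMMON_WORDS.any (fun w => PySem.Chars.isIn w (PySem.Chars.lower out)))
      (fun k => decryptB s.toList k) COMMON_KEYS []
    simp only [vigenere_try, vigenere_try_alt, h, not_true, if_neg, ite_true, decrypt_eq,
      not_false_eq_true]
    simpa using key
  · simp [vigenere_try, vigenere_try_alt, h]
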